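-- pv_equiv track=rewrite | github.com/xark-argo/argo | backend/core/bot_runner/roleplay_world_info.py | parse_decorators
-- ===== SOURCE A (Python) =====
-- KNOWN_DECORATORS = ["@@activate", "@@dont_activate"]
--
-- def parse_decorators(content):
--     def is_known_decorator(data):
--         if data.startswith("@@@"):
--             data = data[1:]
--         return any(data.startswith(decorator) for decorator in KNOWN_DECORATORS)
--
--     if content.startswith("@@"):
--         new_content = content
--         splited = content.split("\n")
--         decorators = []
--         fallbacked = False
--
--         for i, line in enumerate(splited):
--             if line.startswith("@@"):
--                 if line.startswith("@@@") and not fallbacked: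
--                     continue
--
--                 if is_known_decorator(line):
--                     decorators.append(line[1:] if line.startswith("@@@") else line)
--                     fallbacked = False
--                 else:
--                     fallbacked = True
--             else:
--                 new_content = "\n".join(splited[i:])
--                 break
--
--         return decorators, new_content
--
--     return [], content
-- ===== SOURCE B (Python) =====
-- KNOWN_DECORATORS = ("@@activate", "@@dont_activate")
--
-- def parse_decorators(content):
--     # Segment-based algorithm: the leading run of '@@' lines decomposes into
--     # segments, each headed by a plain '@@' line (leading '@@@' lines belong to
--     # no segment and are dropped). Each segment yields at most one decorator:
--     # the head itself if it is known, otherwise the first '@@@' line in the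
--     # segment whose '@'-stripped form is known. No running flag is needed.
--     if not content.startswith("@@"):
--         return [], content
--     lines = content.split("\n")
--     n = 0
--     while n < len(lines) and lines[n].startswith("@@"):
--         n += 1
--     prefix = lines[:n]
--     decorators = []
--     i = 0
--     while i < len(prefix) and prefix[i].startswith("@@@"):
--         i += 1  # drop leading '@@@' lines (they head no segment)
--     while i < len(prefix):
--         head = prefix[i]
--         j = i + 1
--         while j < len(prefix) and prefix[j].startswith("@@@"):
--             j += 1  # the '@@@' lines of this segment
--         if head.startswith(KNOWN_DECORATORS):
--             decorators.append(head)
--         else: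
--             for t in prefix[i + 1:j]:
--                 if t[1:].startswith(KNOWN_DECORATORS):
--                     decorators.append(t[1:])
--                     break
--         i = j
--     new_content = content if n == len(lines) else "\n".join(lines[n:])
--     return decorators, new_content
-- ===== Notes on version B (the rewrite author's own statement) =====
-- stated objective: alternative
-- what changed: Replaces A's single flag-driven (fallbacked) loop by a segment algorithm: the leading '@@' run is split into segments headed by plain '@@' lines (leading '@@@' lines dropped), and each segment contributes at most one decorator - the head if known, else the first '@@@' line whose '@'-stripped form is known; no running boolean state.
import Mathlib
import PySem

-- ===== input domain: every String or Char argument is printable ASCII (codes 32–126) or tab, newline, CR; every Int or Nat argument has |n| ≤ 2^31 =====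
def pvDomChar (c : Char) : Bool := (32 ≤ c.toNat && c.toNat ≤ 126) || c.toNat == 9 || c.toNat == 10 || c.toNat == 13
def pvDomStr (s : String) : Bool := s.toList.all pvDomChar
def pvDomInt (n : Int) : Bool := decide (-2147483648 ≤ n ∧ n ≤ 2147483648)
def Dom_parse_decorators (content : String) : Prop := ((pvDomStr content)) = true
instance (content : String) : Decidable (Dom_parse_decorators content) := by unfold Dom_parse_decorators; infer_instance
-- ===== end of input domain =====

-- B replaces A's flag-driven loop by a segment algorithm: the '@@' prefix splits into
-- segments headed by plain '@@' lines, each yielding at most one decorator; alternative shape.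

-- ===== PORT A =====
def KNOWN_DECORATORS : List String := ["@@activate", "@@dont_activate"]

def is_known_decorator (data : String) : Bool :=
  let data := if PySem.Str.startswith data "@@@" then PySem.Str.slice data (some 1) none else data
  KNOWN_DECORATORS.any (fun decorator => PySem.Str.startswith data decorator)

-- the 'for i, line in enumerate(splited)' loop with break, state = (new_content, decorators, fallbacked)
def parseA_go (splited : List String) : List (Int × String) → String → List String → Bool → List String × String
  | [], new_content, decorators, _ => (decorators, new_content)
  | (i, line) :: rest, new_content, decorators, fallbacked =>
    if PySem.Str.startswith line "@@" then
      if PySem.Str.startswith line "@@@" && !fallbacked then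
        parseA_go splited rest new_content decorators fallbacked
      else if is_known_decorator line then
        parseA_go splited rest new_content
          (decorators ++ [if PySem.Str.startswith line "@@@" then PySem.Str.slice line (some 1) none else line]) false
      else
        parseA_go splited rest new_content decorators true
    else
      (decorators, PySem.Str.join "\n" (PySem.List.slice splited (some i) none))

def parse_decorators (content : String) : List String × String :=
  if PySem.Str.startswith content "@@" then
    let splited := (PySem.Str.split? content "\n").getD []   -- sep ≠ "" so split? is always some
    parseA_go splited (PySem.List.enumerate splited 0) content [] false
  else ([], content)

-- ===== PORT B =====
-- line classified as a '@@@' line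
def pvTrip (l : String) : Bool := PySem.Str.startswith l "@@@"
-- a '@@@' line whose '@'-stripped form is a known decorator
def pvKnS (t : String) : Bool :=
  PySem.Str.startswith (PySem.Str.slice t (some 1) none) "@@activate" ||
  PySem.Str.startswith (PySem.Str.slice t (some 1) none) "@@dont_activate"

-- the outer while loop over segments: head = plain '@@' line, its '@@@' run follows;
-- the inner for-with-break over the segment's '@@@' lines is find?
def parseB_go : List String → List String
  | [] => []
  | head :: ls =>
    (if PySem.Str.startswith head "@@activate" || PySem.Str.startswith head "@@dont_activate" then
        [head]
     else
        match (ls.takeWhile pvTrip).find? pvKnS with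
        | some t => [PySem.Str.slice t (some 1) none]
        | none => []) ++ parseB_go (ls.dropWhile pvTrip)
termination_by l => l.length
decreasing_by
  simp only [List.length_cons]
  exact Nat.lt_succ_of_le (List.length_dropWhile_le _ _)

def parse_decorators_alt (content : String) : List String × String :=
  if !PySem.Str.startswith content "@@" then ([], content)
  else
    let lines := (PySem.Str.split? content "\n").getD []   -- sep ≠ "" so split? is always some
    let n := (lines.takeWhile (fun l => PySem.Str.startswith l "@@")).length  -- the counting while loop
    let pre := lines.take n
    let decorators := parseB_go (pre.dropWhile pvTrip)  -- drop leading '@@@' lines, then the segment scan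
    let new_content := if n = lines.length then content else PySem.Str.join "\n" (lines.drop n)
    (decorators, new_content)

-- ===== PRECONDITION & SPEC =====
def Spec_parse_decorators (content : String) (out : List String × String) : Prop := out = parse_decorators_alt content
instance (content : String) (out : List String × String) : Decidable (Spec_parse_decorators content out) := by unfold Spec_parse_decorators; infer_instance

-- ===== CLAIM (what is proved, stated in full; the proofs are below) =====
def Claim_equal_parse_decorators : Prop := ∀ (content : String), Dom_parse_decorators content → Spec_parse_decorators content (parse_decorators content)

-- ===== LEMMAS AND PROOFS =====

-- A's collection loop over the decorator prefix, state = (decorators, fallbacked)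
def collectA : List String → List String → Bool → List String
  | [], dec, _ => dec
  | line :: rest, dec, fb =>
    if pvTrip line && !fb then collectA rest dec fb
    else
      let body := if pvTrip line then PySem.Str.slice line (some 1) none else line
      if PySem.Str.startswith body "@@activate" || PySem.Str.startswith body "@@dont_activate" then
        collectA rest (dec ++ [body]) false
      else collectA rest dec true

theorem known_eq (line : String) :
    is_known_decorator line =
      (PySem.Str.startswith
          (if PySem.Str.startswith line "@@@" then PySem.Str.slice line (some 1) none else line)
          "@@activate" ||
       PySem.Str.startswith
          (if PySem.Str.startswith line "@@@" then PySem.Str.slice line (some 1) none else line)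
          "@@dont_activate") := by
  simp [is_known_decorator, KNOWN_DECORATORS, List.any]

theorem parseA_go_eq (splited : List String) (suf : List String) (i : Int)
    (hi : 0 ≤ i) (hdrop : splited.drop i.toNat = suf) (nc : String) (dec : List String) (fb : Bool) :
    parseA_go splited (PySem.List.enumerate suf i) nc dec fb =
      (collectA (suf.takeWhile (fun l => PySem.Str.startswith l "@@")) dec fb,
       if suf.dropWhile (fun l => PySem.Str.startswith l "@@") = [] then nc
       else PySem.Str.join "\n" (suf.dropWhile (fun l => PySem.Str.startswith l "@@"))) := by
  induction suf generalizing i dec fb with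
  | nil => simp [PySem.List.enumerate, parseA_go, collectA]
  | cons line suf ih =>
    have hi' : (0 : Int) ≤ i + 1 := by omega
    have hdrop' : splited.drop (i + 1).toNat = suf := by
      have ht : (i + 1).toNat = i.toNat + 1 := by omega
      rw [ht, ← List.drop_drop, hdrop]
      simp [List.drop_drop]
    have ihstep := ih (i + 1) hi' hdrop'
    rw [PySem.List.enumerate_cons]
    cases h2 : PySem.Str.startswith line "@@" with
    | false =>
      have hslice : PySem.List.slice splited (some i) none = line :: suf := by
        rw [PySem.List.slice_from splited hi, hdrop]
      simp only [parseA_go, h2, Bool.false_eq_true, if_false, List.takeWhile_cons,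
        List.dropWhile_cons, hslice, collectA]
      simp
    | true =>
      cases h3 : PySem.Str.startswith line "@@@" with
      | false =>
        simp only [parseA_go, collectA, List.takeWhile_cons, List.dropWhile_cons, h2, h3,
          known_eq line, pvTrip, Bool.false_and, Bool.false_eq_true, if_false, if_true,
          eq_self_iff_true, ite_true, ite_false]
        split_ifs with hkn <;> simp_all [ihstep]
      | true =>
        cases fb with
        | false =>
          simp only [parseA_go, collectA, List.takeWhile_cons, List.dropWhile_cons, h2, h3,
            pvTrip, Bool.not_false, Bool.and_true, Bool.and_self, if_true, eq_self_iff_true, ite_true]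
          simp_all [ihstep]
        | true =>
          simp only [parseA_go, collectA, List.takeWhile_cons, List.dropWhile_cons, h2, h3,
            known_eq line, pvTrip, Bool.not_true, Bool.and_false, Bool.false_eq_true, if_false, if_true,
            eq_self_iff_true, ite_true, ite_false]
          split_ifs with hkn <;> simp_all [ihstep]

-- A's flag-fold equals B's segment scan (fb=false) / the in-segment search (fb=true)
theorem collectA_eq (ls : List String) : ∀ (dec : List String),
    collectA ls dec false = dec ++ parseB_go (ls.dropWhile pvTrip) ∧
    collectA ls dec true =
      dec ++ ((match (ls.takeWhile pvTrip).find? pvKnS with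
               | some t => [PySem.Str.slice t (some 1) none]
               | none => []) ++ parseB_go (ls.dropWhile pvTrip)) := by
  induction ls with
  | nil => intro dec; simp [collectA, parseB_go]
  | cons l ls ih =>
    intro dec
    by_cases ht : pvTrip l = true
    · constructor
      · -- fb = false: the '@@@' line is skipped
        simp only [collectA, ht, Bool.not_false, Bool.and_true, if_true,
          List.dropWhile_cons, ite_true]
        exact (ih dec).1
      · -- fb = true: the '@@@' line is examined
        simp only [collectA, ht, Bool.not_true, Bool.and_false, Bool.false_eq_true, if_false,
          List.takeWhile_cons, List.dropWhile_cons, List.find?, ite_true, if_true]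
        by_cases hk : pvKnS l = true
        · have hk' := hk
          simp only [pvKnS] at hk'
          simp only [hk', hk, ite_true, if_true]
          rw [(ih (dec ++ [PySem.Str.slice l (some 1) none])).1]
          simp
        · have hk' : (PySem.Str.startswith (PySem.Str.slice l (some 1) none) "@@activate" ||
              PySem.Str.startswith (PySem.Str.slice l (some 1) none) "@@dont_activate") = false := by
            simpa [pvKnS] using hk
          simp only [hk', hk, Bool.false_eq_true, if_false, ite_false]
          exact (ih dec).2
    · -- a plain '@@' head: both flag values behave identically
      have ht' : pvTrip l = false := by simpa using ht
      have main : ∀ fb, collectA (l :: ls) dec fb = dec ++ parseB_go (l :: ls) := by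
        intro fb
        rw [parseB_go]
        simp only [collectA, ht', Bool.false_and, Bool.false_eq_true, if_false, ite_false]
        by_cases hk : (PySem.Str.startswith l "@@activate" || PySem.Str.startswith l "@@dont_activate") = true
        · simp only [hk, if_true, ite_true]
          rw [(ih (dec ++ [l])).1]
          simp
        · have hk' : (PySem.Str.startswith l "@@activate" || PySem.Str.startswith l "@@dont_activate") = false := by
            simpa using hk
          simp only [hk', Bool.false_eq_true, if_false, ite_false]
          rw [(ih dec).2]
      constructor
      · rw [main false]
        simp [List.dropWhile_cons, ht']
      · rw [main true]
        simp [List.takeWhile_cons, List.dropWhile_cons, ht']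

theorem take_len_takeWhile {α : Type} (p : α → Bool) (l : List α) :
    l.take (l.takeWhile p).length = l.takeWhile p := by
  induction l with
  | nil => simp
  | cons a l ih =>
    by_cases h : p a = true <;> simp [List.takeWhile_cons, h, ih]

theorem drop_len_takeWhile {α : Type} (p : α → Bool) (l : List α) :
    l.drop (l.takeWhile p).length = l.dropWhile p := by
  induction l with
  | nil => simp
  | cons a l ih =>
    by_cases h : p a = true <;> simp [List.takeWhile_cons, List.dropWhile_cons, h, ih]

theorem len_takeWhile_eq_iff {α : Type} (p : α → Bool) (l : List α) :
    ((l.takeWhile p).length = l.length) ↔ l.dropWhile p = [] := by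
  have h := congrArg List.length (List.takeWhile_append_dropWhile (p := p) (l := l))
  simp only [List.length_append] at h
  constructor
  · intro he
    have : (l.dropWhile p).length = 0 := by omega
    exact List.length_eq_zero_iff.mp this
  · intro he
    rw [he] at h
    simpa using h

-- ===== VERDICT (by name: the statement is the Claim_ definition above) =====
theorem parse_decorators_spec : Claim_equal_parse_decorators := by
  intro content _
  unfold Spec_parse_decorators parse_decorators parse_decorators_alt
  cases h : PySem.Str.startswith content "@@" with
  | false => simp [h]
  | true =>
    have hmain := parseA_go_eq ((PySem.Str.split? content "\n").getD [])
      ((PySem.Str.split? content "\n").getD []) 0 (by omega) (by simp) content [] false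
    simp only [h, Bool.not_true, Bool.false_eq_true, if_false]
    rw [hmain]
    have hcoll := (collectA_eq (((PySem.Str.split? content "\n").getD []).takeWhile
      (fun l => PySem.Str.startswith l "@@")) []).1
    simp only [List.nil_append] at hcoll
    rw [hcoll, take_len_takeWhile, drop_len_takeWhile]
    rcases Decidable.em ((((PySem.Str.split? content "\n").getD []).dropWhile
        (fun l => PySem.Str.startswith l "@@")) = []) with he | he
    · rw [if_pos he, if_pos ((len_takeWhile_eq_iff _ _).mpr he), if_pos trivial]
    · rw [if_neg he, if_neg (fun hc => he ((len_takeWhile_eq_iff _ _).mp hc)), if_pos trivial]
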